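-- pv_equiv track=rewrite | github.com/CODE-U-S/Coding_Test_Study | 2st/Riyeon/배열의 길이에 따라 다른 연산하기.py | solution
-- ===== SOURCE A (Python) =====
-- def solution(arr, n):
--     arrlen = len(arr)
--     for i in range(len(arr)):
--         if i % 2 == 0 and arrlen % 2 == 1:
--             arr[i] += n
--         elif i % 2 == 1 and arrlen % 2 == 0:
--             arr[i] += n
--     return arr
-- ===== SOURCE B (Python) =====
-- def solution(arr, n):
--     # offset from length parity, then one strided loop (no branching inside)
--     start = 0 if len(arr) % 2 == 1 else 1
--     for i in range(start, len(arr), 2):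
--         arr[i] += n
--     return arr
-- ===== Notes on version B (the rewrite author's own statement) =====
-- stated objective: simpler
-- what changed: Replaces the full scan with a two-branch parity test inside it by computing the start offset from the length parity once and adding n in a single branchless strided loop over only the affected (half of the) indices.
import Mathlib
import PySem

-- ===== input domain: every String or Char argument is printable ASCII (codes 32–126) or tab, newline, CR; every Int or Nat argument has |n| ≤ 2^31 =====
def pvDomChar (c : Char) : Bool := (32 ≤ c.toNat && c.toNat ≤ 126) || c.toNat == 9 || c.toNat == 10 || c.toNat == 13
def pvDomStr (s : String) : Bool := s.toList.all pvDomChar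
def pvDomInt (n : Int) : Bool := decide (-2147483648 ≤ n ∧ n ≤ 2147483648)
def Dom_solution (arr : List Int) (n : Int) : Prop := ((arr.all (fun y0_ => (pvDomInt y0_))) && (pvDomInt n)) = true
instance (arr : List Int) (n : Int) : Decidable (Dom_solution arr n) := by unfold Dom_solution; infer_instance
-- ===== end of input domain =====

-- B replaces A's full scan with two parity branches inside by a parity-derived
-- start offset and one branchless strided loop over only the affected indices (simpler).
-- Note: the Python versions mutate arr in place; the equivalence proved here is about the return value.


-- ===== PORT A =====
-- full scan over range(len(arr)); branch on index parity and length parity inside the loop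
def solution (arr : List Int) (n : Int) : List Int :=
  let arrlen := arr.length
  (List.range arr.length).foldl
    (fun a i =>
      if i % 2 = 0 ∧ arrlen % 2 = 1 then a.set i (a.getD i 0 + n)
      else if i % 2 = 1 ∧ arrlen % 2 = 0 then a.set i (a.getD i 0 + n)
      else a) arr

-- ===== PORT B =====
-- start offset from length parity, then a single branchless strided loop;
-- range(start, len, 2) has (len - start + 1) / 2 elements, ported as List.range' start _ 2
def solution_alt (arr : List Int) (n : Int) : List Int :=
  let start := if arr.length % 2 = 1 then 0 else 1
  (List.range' start ((arr.length - start + 1) / 2) 2).foldl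
    (fun a i => a.set i (a.getD i 0 + n)) arr

-- ===== PRECONDITION & SPEC =====
def Spec_solution (arr : List Int) (n : Int) (out : List Int) : Prop := out = solution_alt arr n
instance (arr : List Int) (n : Int) (out : List Int) : Decidable (Spec_solution arr n out) := by unfold Spec_solution; infer_instance

-- ===== CLAIM (what is proved, stated in full; the proofs are below) =====
def Claim_equal_solution : Prop := ∀ (arr : List Int) (n : Int), Dom_solution arr n → Spec_solution arr n (solution arr n)

-- ===== LEMMAS AND PROOFS =====

/-- One loop body step: conditionally add `n` at index `i`. -/
def bump (n : Int) (p : Nat → Prop) [DecidablePred p] (a : List Int) (i : Nat) : List Int :=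
  if p i then a.set i (a.getD i 0 + n) else a

theorem length_foldl_bump (n : Int) (p : Nat → Prop) [DecidablePred p] :
    ∀ (idxs : List Nat) (a : List Int), (idxs.foldl (bump n p) a).length = a.length := by
  intro idxs
  induction idxs with
  | nil => intro a; rfl
  | cons i rest ih =>
      intro a
      simp only [List.foldl_cons, ih]
      unfold bump
      split <;> simp

theorem getD_foldl_bump (n : Int) (p : Nat → Prop) [DecidablePred p] :
    ∀ (idxs : List Nat) (a : List Int), idxs.Nodup → (∀ i ∈ idxs, i < a.length) →
      ∀ j, (idxs.foldl (bump n p) a).getD j 0 =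
        if j ∈ idxs ∧ p j then a.getD j 0 + n else a.getD j 0 := by
  intro idxs
  induction idxs with
  | nil => intro a _ _ j; simp
  | cons i rest ih =>
      intro a hnd hlt j
      have hi : i < a.length := hlt i (by simp)
      have hlen : (bump n p a i).length = a.length := by
        unfold bump; split <;> simp
      obtain ⟨hinr, hndr⟩ := List.nodup_cons.mp hnd
      have hrest := ih (bump n p a i) hndr
        (fun k hk => by rw [hlen]; exact hlt k (List.mem_cons_of_mem _ hk)) j
      simp only [List.foldl_cons, hrest]
      have hgd : ∀ j, (bump n p a i).getD j 0 =
          if j = i ∧ p i then a.getD j 0 + n else a.getD j 0 := by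
        intro j
        unfold bump
        by_cases hp : p i
        · simp only [hp, if_true, and_true]
          by_cases hji : j = i
          · subst hji
            have hj' : j < (a.set j (a.getD j 0 + n)).length := by simpa using hi
            rw [List.getD_eq_getElem _ _ hj', List.getElem_set_self,
              if_pos rfl, List.getD_eq_getElem _ _ hi]
          · simp [List.getD_eq_getElem?_getD, List.getElem?_set_ne (by omega : i ≠ j), hji]
        · simp [hp]
      rw [hgd j]
      by_cases hjr : j ∈ rest
      · have hji : j ≠ i := fun h => hinr (h ▸ hjr)
        simp [hjr, hji]
      · by_cases hji : j = i
        · subst hji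
          simp [hjr, List.mem_cons]
        · simp [hjr, hji, List.mem_cons]

/-- A's loop body is a `bump` with A's combined parity predicate. -/
theorem solution_eq_foldl_bump (arr : List Int) (n : Int) :
    solution arr n = (List.range arr.length).foldl
      (bump n (fun i => i % 2 ≠ arr.length % 2)) arr := by
  unfold solution
  apply List.foldl_ext
  intro a i _
  unfold bump
  have h2 : arr.length % 2 = 0 ∨ arr.length % 2 = 1 := Nat.mod_two_eq_zero_or_one _
  have h2' : i % 2 = 0 ∨ i % 2 = 1 := Nat.mod_two_eq_zero_or_one i
  split_ifs <;> first | rfl | omega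

/-- B's loop body is a `bump` with the always-true predicate. -/
theorem solution_alt_eq_foldl_bump (arr : List Int) (n : Int) :
    solution_alt arr n =
      (List.range' (if arr.length % 2 = 1 then 0 else 1)
        ((arr.length - (if arr.length % 2 = 1 then 0 else 1) + 1) / 2) 2).foldl
        (bump n (fun _ => True)) arr := by
  unfold solution_alt
  apply List.foldl_ext
  intro a i _
  unfold bump
  simp

-- ===== VERDICT (by name: the statement is the Claim_ definition above) =====
theorem solution_spec : Claim_equal_solution := by
  intro arr n _
  unfold Spec_solution
  set L := arr.length with hL
  set start : Nat := if L % 2 = 1 then 0 else 1 with hs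
  have hparity : (L % 2 = 1 ∧ start = 0) ∨ (L % 2 = 0 ∧ start = 1) := by
    rw [hs]
    rcases Nat.mod_two_eq_zero_or_one L with h | h <;> simp [h]
  rw [solution_eq_foldl_bump, solution_alt_eq_foldl_bump]
  have hlenA := length_foldl_bump n (fun i => i % 2 ≠ L % 2) (List.range L) arr
  have hlenB := length_foldl_bump n (fun _ => True)
    (List.range' start ((L - start + 1) / 2) 2) arr
  have hndA : (List.range L).Nodup := List.nodup_range
  have hndB : (List.range' start ((L - start + 1) / 2) 2).Nodup :=
    List.nodup_range' 2 (by decide)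
  have hltA : ∀ i ∈ List.range L, i < arr.length := by
    intro i hi; rw [← hL]; exact List.mem_range.mp hi
  have hltB : ∀ i ∈ List.range' start ((L - start + 1) / 2) 2, i < arr.length := by
    intro i hi
    obtain ⟨k, hk, rfl⟩ := List.mem_range'.mp hi
    rw [← hL]; omega
  apply List.ext_getElem (by rw [hlenA, hlenB])
  intro j hj1 hj2
  have hjlt : j < L := by rw [hL]; rw [hlenA] at hj1; exact hj1
  have hA := getD_foldl_bump n (fun i => i % 2 ≠ L % 2) (List.range L) arr hndA hltA j
  have hB := getD_foldl_bump n (fun _ => True)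
    (List.range' start ((L - start + 1) / 2) 2) arr hndB hltB j
  rw [← List.getD_eq_getElem _ 0 hj1, ← List.getD_eq_getElem _ 0 hj2, hA, hB]
  have hmemB : j ∈ List.range' start ((L - start + 1) / 2) 2 ↔
      ∃ k, k < (L - start + 1) / 2 ∧ j = start + 2 * k := List.mem_range'
  clear hA hB hlenA hlenB hndA hndB hltA hltB hj1 hj2
  clear_value start L
  clear hs hL
  rcases hparity with ⟨hLp, rfl⟩ | ⟨hLp, rfl⟩ <;>
  · by_cases hp : j % 2 ≠ L % 2
    · have hjmem : j ∈ List.range L := List.mem_range.mpr hjlt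
      have : j ∈ List.range' _ ((L - _ + 1) / 2) 2 :=
        hmemB.mpr ⟨j / 2, by omega, by omega⟩
      simp only [Nat.sub_zero] at this
      simp [hjmem, hp, this]
    · have hnot := hmemB.not.mpr (by rintro ⟨k, hk, rfl⟩; omega)
      simp only [Nat.sub_zero] at hnot
      simp [hp, hnot]
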